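-- pv_equiv track=rewrite | github.com/adpena/molt | tools/molt_regrtest_shim.py | compat_skip_reason
-- ===== SOURCE A (Python) =====
-- def compat_skip_reason(stdout: str, stderr: str) -> str | None:
--     text = "\n".join([stdout, stderr])
--     if "MOLT_COMPAT_ERROR:" not in text:
--         return None
--     feature = None
--     location = None
--     for line in text.splitlines():
--         stripped = line.strip()
--         if stripped.startswith("feature:"):
--             feature = stripped[len("feature:") :].strip()
--         elif stripped.startswith("location:"):
--             location = stripped[len("location:") :].strip()
--     if feature and location:
--         return f"MOLT_COMPAT_ERROR: {feature} @ {location}"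
--     if feature:
--         return f"MOLT_COMPAT_ERROR: {feature}"
--     if location:
--         return f"MOLT_COMPAT_ERROR: {location}"
--     return "MOLT_COMPAT_ERROR"
-- ===== SOURCE B (Python) =====
-- def compat_skip_reason(stdout: str, stderr: str) -> str | None:
--     text = "\n".join([stdout, stderr])
--     if "MOLT_COMPAT_ERROR:" not in text:
--         return None
--     lines = text.splitlines()
--
--     def last_value(prefix):
--         # last assignment wins in A, so scan back-to-front and stop at the first hit
--         for line in reversed(lines):
--             s = line.strip()
--             if s.startswith(prefix):
--                 return s[len(prefix):].strip()
--         return ""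
--
--     feature = last_value("feature:")
--     location = last_value("location:")
--     if feature and location:
--         return f"MOLT_COMPAT_ERROR: {feature} @ {location}"
--     if feature:
--         return f"MOLT_COMPAT_ERROR: {feature}"
--     if location:
--         return f"MOLT_COMPAT_ERROR: {location}"
--     return "MOLT_COMPAT_ERROR"
-- ===== Notes on version B (the rewrite author's own statement) =====
-- stated objective: alternative
-- what changed: Replaces A's single forward pass that keeps overwriting two mutable feature/location slots with two independent backward scans (reversed lines, early return at the first match), exploiting that the last assignment wins; the empty-string-as-falsy assembly is kept.
import Mathlib
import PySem

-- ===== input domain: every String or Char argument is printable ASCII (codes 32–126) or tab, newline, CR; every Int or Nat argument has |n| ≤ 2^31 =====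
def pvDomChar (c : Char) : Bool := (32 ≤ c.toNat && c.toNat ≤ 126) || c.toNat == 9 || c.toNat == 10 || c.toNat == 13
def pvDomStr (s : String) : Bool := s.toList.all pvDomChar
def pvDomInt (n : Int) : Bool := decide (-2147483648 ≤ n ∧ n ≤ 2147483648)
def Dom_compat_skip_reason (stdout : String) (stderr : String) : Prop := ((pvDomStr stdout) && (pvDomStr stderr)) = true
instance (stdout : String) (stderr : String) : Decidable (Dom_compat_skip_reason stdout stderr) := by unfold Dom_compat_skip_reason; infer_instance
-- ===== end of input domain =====

-- B replaces A's forward overwrite-both-slots loop with two independent backward scans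
-- (first match from the end = last assignment); same return value, alternative structure.

-- ===== PORT A =====
-- Python truthiness of a `str | None` variable: None and "" are falsy.
def pyTruthyOpt : Option String → Bool
  | some s => s != ""
  | none => false

def csrStep (st : Option String × Option String) (line : String) : Option String × Option String :=
  let stripped := PySem.Str.strip line
  if PySem.Str.startswith stripped "feature:" then
    (some (PySem.Str.strip (PySem.Str.slice stripped (some 8) none)), st.2)
  else if PySem.Str.startswith stripped "location:" then
    (st.1, some (PySem.Str.strip (PySem.Str.slice stripped (some 9) none)))
  else st

def compat_skip_reason (stdout : String) (stderr : String) : Option String :=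
  let text := PySem.Str.join "\n" [stdout, stderr]
  if PySem.Str.isIn "MOLT_COMPAT_ERROR:" text = false then none
  else
    let st := (PySem.Str.splitlines text).foldl csrStep (none, none)
    let feature := st.1
    let location := st.2
    if pyTruthyOpt feature && pyTruthyOpt location then
      some ("MOLT_COMPAT_ERROR: " ++ feature.getD "" ++ " @ " ++ location.getD "")
    else if pyTruthyOpt feature then
      some ("MOLT_COMPAT_ERROR: " ++ feature.getD "")
    else if pyTruthyOpt location then
      some ("MOLT_COMPAT_ERROR: " ++ location.getD "")
    else some "MOLT_COMPAT_ERROR"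

-- ===== PORT B =====
-- `last_value`: scan the reversed line list, return at the first stripped line starting
-- with the prefix (the for/return loop is List.find? on the reversed list), else "".
def lastValue (lines : List String) (pre : String) : String :=
  match lines.reverse.find? (fun line => PySem.Str.startswith (PySem.Str.strip line) pre) with
  | some line => PySem.Str.strip (PySem.Str.slice (PySem.Str.strip line) (some (PySem.Str.len pre)) none)
  | none => ""

def compat_skip_reason_alt (stdout : String) (stderr : String) : Option String :=
  let text := PySem.Str.join "\n" [stdout, stderr]
  if PySem.Str.isIn "MOLT_COMPAT_ERROR:" text = false then none
  else
    let lines := PySem.Str.splitlines text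
    let feature := lastValue lines "feature:"
    let location := lastValue lines "location:"
    if feature != "" && location != "" then
      some ("MOLT_COMPAT_ERROR: " ++ feature ++ " @ " ++ location)
    else if feature != "" then
      some ("MOLT_COMPAT_ERROR: " ++ feature)
    else if location != "" then
      some ("MOLT_COMPAT_ERROR: " ++ location)
    else some "MOLT_COMPAT_ERROR"

-- ===== PRECONDITION & SPEC =====
def Spec_compat_skip_reason (stdout : String) (stderr : String) (out : Option String) : Prop := out = compat_skip_reason_alt stdout stderr
instance (stdout : String) (stderr : String) (out : Option String) : Decidable (Spec_compat_skip_reason stdout stderr out) := by unfold Spec_compat_skip_reason; infer_instance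

-- ===== CLAIM (what is proved, stated in full; the proofs are below) =====
def Claim_equal_compat_skip_reason : Prop := ∀ (stdout : String) (stderr : String), Dom_compat_skip_reason stdout stderr → Spec_compat_skip_reason stdout stderr (compat_skip_reason stdout stderr)

-- ===== LEMMAS AND PROOFS =====

-- a stripped line cannot start with both "feature:" and "location:"
lemma not_both_prefixes (s : String) (h : PySem.Str.startswith s "feature:" = true) :
    PySem.Str.startswith s "location:" = false := by
  by_contra hl
  simp only [Bool.not_eq_false] at hl
  simp only [PySem.Str.startswith_eq] at h hl
  rw [PySem.Chars.startswith_iff] at h hl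
  rcases h with ⟨t1, h1⟩
  rcases hl with ⟨t2, h2⟩
  rw [← h2] at h1
  simp at h1

def extF (line : String) : String :=
  PySem.Str.strip (PySem.Str.slice (PySem.Str.strip line) (some 8) none)

def extL (line : String) : String :=
  PySem.Str.strip (PySem.Str.slice (PySem.Str.strip line) (some 9) none)

lemma fold_fst (lines : List String) (acc : Option String × Option String) :
    (lines.foldl csrStep acc).1 =
      match lines.reverse.find? (fun l => PySem.Str.startswith (PySem.Str.strip l) "feature:") with
      | some l => some (extF l)
      | none => acc.1 := by
  induction lines generalizing acc with
  | nil => simp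
  | cons a t ih =>
    simp only [List.foldl_cons, List.reverse_cons, List.find?_append, ih]
    cases ht : t.reverse.find? (fun l => PySem.Str.startswith (PySem.Str.strip l) "feature:") with
    | some l => simp
    | none =>
      simp only [Option.or, List.find?]
      by_cases hf : PySem.Str.startswith (PySem.Str.strip a) "feature:" = true
      · rw [hf]
        simp only [csrStep]
        split
        · simp [extF]
        · exfalso; simp_all
      · simp only [Bool.not_eq_true] at hf
        rw [hf]
        simp only [csrStep]
        split
        · exfalso; simp_all
        · split <;> simp

lemma fold_snd (lines : List String) (acc : Option String × Option String) :
    (lines.foldl csrStep acc).2 =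
      match lines.reverse.find? (fun l => PySem.Str.startswith (PySem.Str.strip l) "location:") with
      | some l => some (extL l)
      | none => acc.2 := by
  induction lines generalizing acc with
  | nil => simp
  | cons a t ih =>
    simp only [List.foldl_cons, List.reverse_cons, List.find?_append, ih]
    cases ht : t.reverse.find? (fun l => PySem.Str.startswith (PySem.Str.strip l) "location:") with
    | some l => simp
    | none =>
      simp only [Option.or, List.find?]
      by_cases hl : PySem.Str.startswith (PySem.Str.strip a) "location:" = true
      · have hff : PySem.Str.startswith (PySem.Str.strip a) "feature:" = false := by
          by_contra hc
          simp only [Bool.not_eq_false] at hc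
          rw [not_both_prefixes _ hc] at hl
          exact Bool.false_ne_true hl
        rw [hl]
        simp only [csrStep]
        split
        · exfalso; simp_all
        · simp [extL]
      · simp only [Bool.not_eq_true] at hl
        rw [hl]
        simp only [csrStep]
        split <;> simp_all

lemma len_feature : PySem.Str.len "feature:" = 8 := by decide
lemma len_location : PySem.Str.len "location:" = 9 := by decide

-- ===== VERDICT (by name: the statement is the Claim_ definition above) =====
theorem compat_skip_reason_spec : Claim_equal_compat_skip_reason := by
  intro stdout stderr _
  unfold Spec_compat_skip_reason compat_skip_reason compat_skip_reason_alt
  by_cases hin : PySem.Str.isIn "MOLT_COMPAT_ERROR:" (PySem.Str.join "\n" [stdout, stderr]) = false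
  · rw [if_pos hin, if_pos hin]
  · rw [if_neg hin, if_neg hin]
    have hF := fold_fst (PySem.Str.splitlines (PySem.Str.join "\n" [stdout, stderr])) (none, none)
    have hL := fold_snd (PySem.Str.splitlines (PySem.Str.join "\n" [stdout, stderr])) (none, none)
    unfold lastValue
    rw [len_feature, len_location]
    cases hf : (PySem.Str.splitlines (PySem.Str.join "\n" [stdout, stderr])).reverse.find?
        (fun l => PySem.Str.startswith (PySem.Str.strip l) "feature:") with
    | none =>
      simp only [hf] at hF
      cases hl : (PySem.Str.splitlines (PySem.Str.join "\n" [stdout, stderr])).reverse.find?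
          (fun l => PySem.Str.startswith (PySem.Str.strip l) "location:") with
      | none =>
        simp only [hl] at hL
        simp only [hF, hL, hf, hl]
        simp [pyTruthyOpt]
      | some l =>
        simp only [hl] at hL
        simp only [hF, hL, hf, hl, pyTruthyOpt, extL]
        split <;> simp_all
    | some fl =>
      simp only [hf] at hF
      cases hl : (PySem.Str.splitlines (PySem.Str.join "\n" [stdout, stderr])).reverse.find?
          (fun l => PySem.Str.startswith (PySem.Str.strip l) "location:") with
      | none =>
        simp only [hl] at hL
        simp only [hF, hL, hf, hl, pyTruthyOpt, extF]
        split <;> simp_all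
      | some l =>
        simp only [hl] at hL
        simp only [hF, hL, hf, hl, pyTruthyOpt, extF, extL]
        split <;> simp_all
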